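-- pv_equiv track=rewrite | github.com/sburdges-eng/miDiKompanion | final kel/lost-and-found/python-packages/kelly 2/src/kelly/engines/voice_leading.py | _check_parallel_fifths
-- ===== SOURCE A (Python) =====
-- from typing import List, Dict, Optional, Tuple
--
-- def _check_parallel_fifths(from_v: List[int], to_v: List[int]) -> bool:
--     """Check for parallel fifths."""
--     from_sorted = sorted(from_v)
--     to_sorted = sorted(to_v)
--
--     for i in range(len(from_sorted) - 1):
--         for j in range(i + 1, len(from_sorted)):
--             from_interval = abs(from_sorted[j] - from_sorted[i]) % 12
--             to_interval = abs(to_sorted[j] - to_sorted[i]) % 12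
--             if from_interval == 7 and to_interval == 7:
--                 return True
--     return False
-- ===== SOURCE B (Python) =====
-- from typing import List
--
-- def _check_parallel_fifths(from_v: List[int], to_v: List[int]) -> bool:
--     """Check for parallel fifths: build the set of index pairs that form a
--     fifth in the from-voicing and the set forming a fifth in the to-voicing,
--     then test whether the two sets intersect."""
--     fs = sorted(from_v)
--     ts = sorted(to_v)
--     n = len(fs)
--     from_fifths = {(i, j) for i in range(n) for j in range(i + 1, n)
--                    if abs(fs[j] - fs[i]) % 12 == 7}
--     to_fifths = {(i, j) for i in range(n) for j in range(i + 1, n)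
--                  if abs(ts[j] - ts[i]) % 12 == 7}
--     return not from_fifths.isdisjoint(to_fifths)
-- ===== Notes on version B (the rewrite author's own statement) =====
-- stated objective: alternative
-- what changed: A's fused short-circuiting double loop is replaced by two independent set-comprehension passes (index pairs forming a fifth in the from-voicing, and in the to-voicing) followed by a set-disjointness test.
-- outside the precondition, e.g. on _check_parallel_fifths([0, 7, 100], [0, 7]): A returns True, B raises IndexError
import Mathlib
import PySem

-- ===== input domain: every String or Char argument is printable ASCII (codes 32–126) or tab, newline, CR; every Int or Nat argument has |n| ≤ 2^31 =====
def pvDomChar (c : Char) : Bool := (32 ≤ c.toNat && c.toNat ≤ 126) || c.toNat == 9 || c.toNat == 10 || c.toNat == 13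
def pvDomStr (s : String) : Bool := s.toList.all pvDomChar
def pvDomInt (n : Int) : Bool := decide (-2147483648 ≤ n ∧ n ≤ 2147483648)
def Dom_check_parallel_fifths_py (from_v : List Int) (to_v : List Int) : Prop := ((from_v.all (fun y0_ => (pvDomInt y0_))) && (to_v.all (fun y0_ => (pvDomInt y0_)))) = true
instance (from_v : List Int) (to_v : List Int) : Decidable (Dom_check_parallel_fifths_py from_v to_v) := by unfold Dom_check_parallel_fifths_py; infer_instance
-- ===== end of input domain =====

-- B replaces A's fused short-circuiting double loop by two independent pair-table
-- passes plus a set-intersection test (objective: alternative decomposition, same cost).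

-- ===== PORT A =====
def check_parallel_fifths_py (from_v : List Int) (to_v : List Int) : Bool :=
  let from_sorted := PySem.List.sorted from_v (fun x => x) false
  let to_sorted := PySem.List.sorted to_v (fun x => x) false
  (PySem.List.pyRange 0 ((from_sorted.length : Int) - 1) 1).any (fun i =>
    (PySem.List.pyRange (i + 1) (from_sorted.length : Int) 1).any (fun j =>
      let from_interval := PySem.Int.mod |PySem.List.pyGetD from_sorted j 0 - PySem.List.pyGetD from_sorted i 0| 12
      let to_interval := PySem.Int.mod |PySem.List.pyGetD to_sorted j 0 - PySem.List.pyGetD to_sorted i 0| 12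
      decide (from_interval = 7 ∧ to_interval = 7)))

-- ===== PORT B =====
def check_parallel_fifths_py_alt (from_v : List Int) (to_v : List Int) : Bool :=
  let fs := PySem.List.sorted from_v (fun x => x) false
  let ts := PySem.List.sorted to_v (fun x => x) false
  let n : Int := fs.length
  let fromFifths : List (Int × Int) :=
    (PySem.List.pyRange 0 n 1).flatMap (fun i =>
      ((PySem.List.pyRange (i + 1) n 1).filter (fun j =>
        PySem.Int.mod |PySem.List.pyGetD fs j 0 - PySem.List.pyGetD fs i 0| 12 == 7)).map (fun j => (i, j)))
  let toFifths : List (Int × Int) :=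
    (PySem.List.pyRange 0 n 1).flatMap (fun i =>
      ((PySem.List.pyRange (i + 1) n 1).filter (fun j =>
        PySem.Int.mod |PySem.List.pyGetD ts j 0 - PySem.List.pyGetD ts i 0| 12 == 7)).map (fun j => (i, j)))
  fromFifths.any (fun p => toFifths.contains p)

-- ===== PRECONDITION & SPEC =====
-- Pre_ excludes inputs with more from-notes than to-notes: there Python A raises
-- IndexError unless an early parallel fifth pre-empts it (A may still return True);
-- B's full table build raises on all of them.
def Pre_check_parallel_fifths_py (from_v : List Int) (to_v : List Int) : Prop :=
  from_v.length ≤ to_v.length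
instance (from_v : List Int) (to_v : List Int) : Decidable (Pre_check_parallel_fifths_py from_v to_v) := by unfold Pre_check_parallel_fifths_py; infer_instance
def pvWitness_check_parallel_fifths_py : List Int × List Int := ([0, 7], [1, 2])
def Spec_check_parallel_fifths_py (from_v : List Int) (to_v : List Int) (out : Bool) : Prop := out = check_parallel_fifths_py_alt from_v to_v
instance (from_v : List Int) (to_v : List Int) (out : Bool) : Decidable (Spec_check_parallel_fifths_py from_v to_v out) := by unfold Spec_check_parallel_fifths_py; infer_instance

-- ===== CLAIM (what is proved, stated in full; the proofs are below) =====
def Claim_equal_check_parallel_fifths_py : Prop := ∀ (from_v : List Int) (to_v : List Int), Dom_check_parallel_fifths_py from_v to_v → Pre_check_parallel_fifths_py from_v to_v → Spec_check_parallel_fifths_py from_v to_v (check_parallel_fifths_py from_v to_v)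

-- ===== LEMMAS AND PROOFS =====

-- Both sides, read abstractly over the two sorted lists, assert the same
-- existence of an index pair (i, j), i < j < n, whose intervals are both 7.
theorem pv_key (fs ts : List Int) :
    ((PySem.List.pyRange 0 ((fs.length : Int) - 1) 1).any (fun i =>
      (PySem.List.pyRange (i + 1) (fs.length : Int) 1).any (fun j =>
        decide (PySem.Int.mod |PySem.List.pyGetD fs j 0 - PySem.List.pyGetD fs i 0| 12 = 7 ∧
                PySem.Int.mod |PySem.List.pyGetD ts j 0 - PySem.List.pyGetD ts i 0| 12 = 7))))
    = (((PySem.List.pyRange 0 (fs.length : Int) 1).flatMap (fun i =>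
        ((PySem.List.pyRange (i + 1) (fs.length : Int) 1).filter (fun j =>
          PySem.Int.mod |PySem.List.pyGetD fs j 0 - PySem.List.pyGetD fs i 0| 12 == 7)).map (fun j => (i, j)))).any
      (fun p => ((PySem.List.pyRange 0 (fs.length : Int) 1).flatMap (fun i =>
        ((PySem.List.pyRange (i + 1) (fs.length : Int) 1).filter (fun j =>
          PySem.Int.mod |PySem.List.pyGetD ts j 0 - PySem.List.pyGetD ts i 0| 12 == 7)).map (fun j => (i, j)))).contains p)) := by
  rw [Bool.eq_iff_iff]
  simp only [List.any_eq_true, List.mem_flatMap, List.mem_map, List.mem_filter,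
    List.contains_eq_mem, PySem.List.mem_pyRange_one, decide_eq_true_eq, beq_iff_eq,
    Prod.exists]
  constructor
  · rintro ⟨i, ⟨hi0, hi1⟩, j, ⟨hj0, hj1⟩, hf, ht⟩
    exact ⟨i, j, ⟨i, ⟨⟨hi0, by omega⟩, j, ⟨⟨⟨hj0, hj1⟩, hf⟩, rfl⟩⟩⟩,
           ⟨i, ⟨⟨hi0, by omega⟩, j, ⟨⟨⟨hj0, hj1⟩, ht⟩, rfl⟩⟩⟩⟩
  · rintro ⟨a, b, ⟨i, ⟨hi0, hi1⟩, j, ⟨⟨⟨hj0, hj1⟩, hf⟩, hij⟩⟩,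
           ⟨i', ⟨hi0', hi1'⟩, j', ⟨⟨⟨hj0', hj1'⟩, ht⟩, hij'⟩⟩⟩
    rw [← hij] at hij'
    injection hij' with h1 h2
    subst h1; subst h2
    exact ⟨i', ⟨hi0', by omega⟩, j', ⟨hj0', hj1'⟩, hf, ht⟩

-- ===== VERDICT (by name: the statement is the Claim_ definition above) =====
theorem check_parallel_fifths_py_spec : Claim_equal_check_parallel_fifths_py := by
  intro from_v to_v _ _
  unfold Spec_check_parallel_fifths_py check_parallel_fifths_py check_parallel_fifths_py_alt
  exact pv_key (PySem.List.sorted from_v (fun x => x) false) (PySem.List.sorted to_v (fun x => x) false)
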